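-- pv_equiv track=rewrite | github.com/huiluczP/ServiceCluster | test/multiply_result.py | average_result
-- ===== SOURCE A (Python) =====
-- def average_result(result_list):
--     # 结果集，去掉最高和最低求平均值
--     result_type = []
--     r = []
--     # 将结果集按类型放入矩阵
--     if len(result_list) > 0:
--         for i in range(len(result_list[0])):
--             simple_list = []
--             for rest in result_list:
--                 simple_list.append(rest[i])
--             result_type.append(simple_list)
--     # 计算平均值
--     for tp in result_type:
--         tp_min = min(tp)
--         tp_max = max(tp)
--         tp_sum = sum(tp) - tp_min - tp_max
--         r.append(tp_sum)
--     return r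
-- ===== SOURCE B (Python) =====
-- def average_result(result_list):
--     # One streaming pass: per-column (sum, min, max) accumulators, no transpose.
--     if not result_list:
--         return []
--     acc = [(v, v, v) for v in result_list[0]]
--     for row in result_list[1:]:
--         acc = [(s + row[j], min(mn, row[j]), max(mx, row[j]))
--                for j, (s, mn, mx) in enumerate(acc)]
--     return [s - mn - mx for (s, mn, mx) in acc]
-- ===== Notes on version B (the rewrite author's own statement) =====
-- stated objective: alternative
-- what changed: B replaces A's build-the-transpose-then-scan-each-column-with-min/max/sum approach by a single streaming pass over the rows that maintains per-column (sum, min, max) accumulators.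
import Mathlib
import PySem

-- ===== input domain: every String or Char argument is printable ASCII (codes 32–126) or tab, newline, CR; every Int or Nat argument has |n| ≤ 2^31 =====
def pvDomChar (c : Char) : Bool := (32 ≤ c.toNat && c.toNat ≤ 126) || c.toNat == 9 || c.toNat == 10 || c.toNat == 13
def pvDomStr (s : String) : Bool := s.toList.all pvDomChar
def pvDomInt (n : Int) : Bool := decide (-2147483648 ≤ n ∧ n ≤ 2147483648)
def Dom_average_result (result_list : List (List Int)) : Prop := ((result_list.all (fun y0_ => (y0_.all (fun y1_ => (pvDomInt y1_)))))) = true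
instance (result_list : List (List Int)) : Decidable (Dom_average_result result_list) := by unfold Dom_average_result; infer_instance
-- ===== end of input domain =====

-- B computes the same column-wise sum-minus-min-minus-max in one streaming pass over the rows
-- (per-column (sum,min,max) accumulators) instead of building the transpose and scanning each column.

-- ===== PORT A =====
-- transpose-then-scan: build result_type (the columns), then sum/min/max each column
def average_result (result_list : List (List Int)) : List Int :=
  let result_type : List (List Int) :=
    if result_list.length > 0 then
      (PySem.List.pyRange 0 ((result_list.headD []).length : Int) 1).map
        (fun i => result_list.map (fun rest => PySem.List.pyGetD rest i 0))
    else []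
  result_type.map (fun tp =>
    tp.sum - ((PySem.List.min? tp (fun y => y)).getD 0)
           - ((PySem.List.max? tp (fun y => y)).getD 0))

-- ===== PORT B =====
-- one row-update step of the streaming pass: comprehension over enumerate(acc)
def avgStep (acc : List (Int × Int × Int)) (row : List Int) : List (Int × Int × Int) :=
  (PySem.List.enumerate acc).map (fun p =>
    let v := PySem.List.pyGetD row p.1 0
    (p.2.1 + v, min p.2.2.1 v, max p.2.2.2 v))

def average_result_alt (result_list : List (List Int)) : List Int :=
  match result_list with
  | [] => []
  | first :: rest =>
    let acc := rest.foldl avgStep (first.map (fun v => (v, v, v)))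
    acc.map (fun p => p.1 - p.2.1 - p.2.2)

-- ===== PRECONDITION & SPEC =====
-- Pre_ excludes ragged inputs on which Python A raises IndexError (a row shorter than the first row).
def Pre_average_result (result_list : List (List Int)) : Prop :=
  ∀ row ∈ result_list, (result_list.headD []).length ≤ row.length
instance (result_list : List (List Int)) : Decidable (Pre_average_result result_list) := by
  unfold Pre_average_result; infer_instance

def pvWitness_average_result : List (List Int) := [[1, 2, 3], [4, 0, 6], [7, 8, -1]]

def Spec_average_result (result_list : List (List Int)) (out : List Int) : Prop := out = average_result_alt result_list
instance (result_list : List (List Int)) (out : List Int) : Decidable (Spec_average_result result_list out) := by unfold Spec_average_result; infer_instance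

-- ===== CLAIM (what is proved, stated in full; the proofs are below) =====
def Claim_equal_average_result : Prop := ∀ (result_list : List (List Int)), Dom_average_result result_list → Pre_average_result result_list → Spec_average_result result_list (average_result result_list)

-- ===== LEMMAS AND PROOFS =====

theorem length_avgStep (acc : List (Int × Int × Int)) (row : List Int) :
    (avgStep acc row).length = acc.length := by
  simp [avgStep, PySem.List.length_enumerate]

theorem length_foldl_avgStep (rows : List (List Int)) (acc : List (Int × Int × Int)) :
    (rows.foldl avgStep acc).length = acc.length := by
  induction rows generalizing acc with
  | nil => rfl
  | cons r rs ih => simp [List.foldl_cons, ih, length_avgStep]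

-- element k of enumerate
theorem getElem_enumerate (xs : List α) (s : Int) (k : Nat) (hk : k < xs.length) :
    (PySem.List.enumerate xs s)[k]'(by simpa [PySem.List.length_enumerate] using hk)
      = (s + k, xs[k]) := by
  induction xs generalizing s k with
  | nil => simp at hk
  | cons x t ih =>
    cases k with
    | zero => simp [PySem.List.enumerate_cons]
    | succ m =>
      simp only [PySem.List.enumerate_cons, List.getElem_cons_succ]
      rw [ih (s + 1) m (by simpa using hk)]
      congr 1
      push_cast; ring

-- one per-column update
def updOne (p : Int × Int × Int) (v : Int) : Int × Int × Int :=
  (p.1 + v, min p.2.1 v, max p.2.2 v)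

theorem getElem_avgStep (acc : List (Int × Int × Int)) (row : List Int) (k : Nat)
    (hk : k < acc.length) :
    (avgStep acc row)[k]'(by simpa [length_avgStep] using hk)
      = updOne acc[k] (row.getD k 0) := by
  simp only [avgStep, List.getElem_map]
  rw [getElem_enumerate acc 0 k hk]
  simp [updOne, PySem.List.pyGetD_natCast]

theorem getElem_foldl_avgStep (rows : List (List Int)) (acc : List (Int × Int × Int))
    (k : Nat) (hk : k < acc.length) :
    (rows.foldl avgStep acc)[k]'(by simpa [length_foldl_avgStep] using hk)
      = rows.foldl (fun p row => updOne p (row.getD k 0)) acc[k] := by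
  induction rows generalizing acc with
  | nil => rfl
  | cons r rs ih =>
    simp only [List.foldl_cons]
    rw [ih (avgStep acc r) (by simpa [length_avgStep] using hk),
        getElem_avgStep acc r k hk]

-- the scalar fold computes (sum, running min, running max) of the column values
theorem foldl_updOne (rows : List (List Int)) (k : Nat) (s m M : Int) :
    rows.foldl (fun p row => updOne p (row.getD k 0)) (s, m, M)
      = (s + (rows.map (fun r => r.getD k 0)).sum,
         (rows.map (fun r => r.getD k 0)).foldl min m,
         (rows.map (fun r => r.getD k 0)).foldl max M) := by
  induction rows generalizing s m M with
  | nil => simp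
  | cons r t ih =>
    simp only [List.foldl_cons, List.map_cons, List.sum_cons]
    rw [show updOne (s, m, M) (r.getD k 0)
          = (s + r.getD k 0, min m (r.getD k 0), max M (r.getD k 0)) from rfl, ih, add_assoc]

theorem average_result_spec : Claim_equal_average_result := by
  intro rl _ _
  unfold Spec_average_result
  cases rl with
  | nil => rfl
  | cons first rest =>
    simp only [average_result, average_result_alt]
    simp only [List.length_cons, gt_iff_lt, Nat.succ_pos, if_pos, List.headD_cons]
    rw [PySem.List.pyRange_zero_nat first.length, List.map_map]
    apply List.ext_getElem
    · simp [length_foldl_avgStep]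
    · intro k h1 h2
      have hk : k < first.length := by simpa using h1
      simp only [List.getElem_map, Function.comp_apply, List.getElem_range]
      rw [getElem_foldl_avgStep rest (first.map (fun v => (v, v, v))) k (by simpa using hk)]
      simp only [List.getElem_map]
      rw [foldl_updOne]
      simp only [List.map_cons, PySem.List.pyGetD_natCast]
      rw [PySem.List.min?_id_cons, PySem.List.max?_id_cons]
      simp only [Option.getD_some, List.sum_cons]
      rw [List.getD_eq_getElem first 0 hk]
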